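-- pv_equiv track=rewrite | github.com/khanhpdt/programming-pearls | maximum_subarray_recursive.py | find_max_subarray_from_one_end
-- ===== SOURCE A (Python) =====
-- def find_max_subarray_from_one_end(array, range_subarray):
--     # starts at one end of the subarray. this end is stored as the left-most element of the given range.
--     max_index = range_subarray[0]
--     max_subarray_sum = array[max_index]
--
--     # find the right-end index giving the maximum-sum subarray
--     subarray_sum = max_subarray_sum
--     for i in range_subarray[1:]:
--         subarray_sum += array[i]
--         if subarray_sum > max_subarray_sum:
--             max_subarray_sum = subarray_sum
--             max_index = i
--
--     return max_index, max_subarray_sum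
-- ===== SOURCE B (Python) =====
-- def find_max_subarray_from_one_end(array, range_subarray):
--     # Build the table of cumulative sums from the fixed left end, then take the
--     # argmax in a separate pass (Python's max keeps the first maximal element,
--     # matching the strict-improvement rule).
--     sums = []
--     total = 0
--     for i in range_subarray:
--         total += array[i]
--         sums.append(total)
--     best_index, best_sum = max(zip(range_subarray, sums), key=lambda p: p[1])
--     return best_index, best_sum
-- ===== Notes on version B (the rewrite author's own statement) =====
-- stated objective: alternative
-- what changed: Replaces the fused accumulate-and-track loop by a cumulative-sum table built in one pass followed by a separate first-occurrence argmax over (index, sum) pairs via max(..., key=...).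
import Mathlib
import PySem

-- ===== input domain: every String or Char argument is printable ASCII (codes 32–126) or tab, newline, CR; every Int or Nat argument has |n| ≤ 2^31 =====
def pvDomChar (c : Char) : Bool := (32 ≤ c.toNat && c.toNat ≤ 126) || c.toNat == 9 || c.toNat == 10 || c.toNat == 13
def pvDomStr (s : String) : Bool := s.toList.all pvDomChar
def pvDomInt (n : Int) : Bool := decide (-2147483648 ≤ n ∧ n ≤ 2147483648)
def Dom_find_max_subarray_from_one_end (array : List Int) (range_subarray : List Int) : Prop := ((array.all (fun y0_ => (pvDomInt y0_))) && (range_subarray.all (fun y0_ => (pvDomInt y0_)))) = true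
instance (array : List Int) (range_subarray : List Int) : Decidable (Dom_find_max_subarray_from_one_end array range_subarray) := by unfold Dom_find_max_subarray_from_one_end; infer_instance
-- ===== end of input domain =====

-- B replaces A's fused accumulate-and-track loop by a cumulative-sum table plus a
-- separate first-occurrence argmax pass over (index, sum) pairs; same O(n) cost.


-- ===== PORT A =====
def find_max_subarray_from_one_end (array : List Int) (range_subarray : List Int) : Int × Int :=
  let max_index := (PySem.List.pyGet? range_subarray 0).getD 0
  let max_subarray_sum := (PySem.List.pyGet? array max_index).getD 0
  let st := (PySem.List.slice range_subarray (some 1) none).foldl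
      (fun (st : Int × Int × Int) i =>
        let subarray_sum := st.2.2 + (PySem.List.pyGet? array i).getD 0
        if subarray_sum > st.2.1 then (i, subarray_sum, subarray_sum)
        else (st.1, st.2.1, subarray_sum))
      (max_index, max_subarray_sum, max_subarray_sum)
  (st.1, st.2.1)

-- ===== PORT B =====
def find_max_subarray_from_one_end_alt (array : List Int) (range_subarray : List Int) : Int × Int :=
  let sums := (range_subarray.foldl
      (fun (acc : List Int × Int) i =>
        let total := acc.2 + (PySem.List.pyGet? array i).getD 0
        (acc.1 ++ [total], total))
      ([], 0)).1
  (PySem.List.max? (range_subarray.zip sums) (fun p => p.2)).getD (0, 0)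

-- ===== PRECONDITION & SPEC =====
-- Pre_: exactly where Python's A returns normally — a nonempty range and every
-- index in it valid for array (A raises IndexError otherwise).
def Pre_find_max_subarray_from_one_end (array : List Int) (range_subarray : List Int) : Prop :=
  range_subarray ≠ [] ∧ ∀ i ∈ range_subarray, PySem.Raise.InRange array.length i
instance (array : List Int) (range_subarray : List Int) : Decidable (Pre_find_max_subarray_from_one_end array range_subarray) := by unfold Pre_find_max_subarray_from_one_end; infer_instance
def pvWitness_find_max_subarray_from_one_end : List Int × List Int := ([1, 2, -3], [0, 1, 2])
def Spec_find_max_subarray_from_one_end (array : List Int) (range_subarray : List Int) (out : Int × Int) : Prop := out = find_max_subarray_from_one_end_alt array range_subarray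
instance (array : List Int) (range_subarray : List Int) (out : Int × Int) : Decidable (Spec_find_max_subarray_from_one_end array range_subarray out) := by unfold Spec_find_max_subarray_from_one_end; infer_instance

-- ===== CLAIM (what is proved, stated in full; the proofs are below) =====
def Claim_equal_find_max_subarray_from_one_end : Prop := ∀ (array : List Int) (range_subarray : List Int), Dom_find_max_subarray_from_one_end array range_subarray → Pre_find_max_subarray_from_one_end array range_subarray → Spec_find_max_subarray_from_one_end array range_subarray (find_max_subarray_from_one_end array range_subarray)

-- ===== LEMMAS AND PROOFS =====

-- cumulative sums of (f i) over rs, starting from running total s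
def pvPS (f : Int → Int) (s : Int) : List Int → List Int
  | [] => []
  | i :: is => (s + f i) :: pvPS f (s + f i) is

-- port B's table-building fold produces exactly the cumulative sums
theorem pvSumsB_eq (f : Int → Int) (rs : List Int) :
    (rs.foldl (fun (a : List Int × Int) i => (a.1 ++ [a.2 + f i], a.2 + f i)) (([] : List Int), 0)).1
      = pvPS f 0 rs := by
  have h : ∀ (rs : List Int) (acc : List Int) (s : Int),
      rs.foldl (fun (a : List Int × Int) i => (a.1 ++ [a.2 + f i], a.2 + f i)) (acc, s)
        = (acc ++ pvPS f s rs, s + ((rs.map f).sum)) := by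
    intro rs; induction rs with
    | nil => intro acc s; simp [pvPS]
    | cons i is ih =>
        intro acc s
        simp only [List.foldl_cons, List.map_cons, List.sum_cons, pvPS]
        rw [ih]
        simp [List.append_assoc]; ring
  rw [h]; simp

-- Python's max over a nonempty list of pairs keyed by the second component,
-- unrolled to a plain pair fold
theorem pvMax_single {κ : Type} [LT κ] [DecidableLT κ] (key : Int × Int → κ) (b : Int × Int) :
    PySem.List.max? [b] key = some b := rfl

theorem pvMax_shift {κ : Type} [LT κ] [DecidableLT κ] (key : Int × Int → κ)
    (b x : Int × Int) (xs : List (Int × Int)) :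
    PySem.List.max? (b :: x :: xs) key
      = PySem.List.max? ((if key b < key x then x else b) :: xs) key := by
  unfold PySem.List.max?
  simp only [List.foldl_cons]
  by_cases h : key b < key x <;> simp [h]

theorem pvMax2 : ∀ (rest : List (Int × Int)) (b : Int × Int),
    PySem.List.max? (b :: rest) (fun p => p.2)
      = some (rest.foldl (fun (m : Int × Int) x => if m.2 < x.2 then x else m) b) := by
  intro rest
  induction rest with
  | nil => intro b; exact pvMax_single _ b
  | cons x xs ih =>
      intro b
      rw [pvMax_shift, ih, List.foldl_cons]

-- A's triple-state fold equals the pair fold over the zip with the prefix sums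
theorem pvFold_eq (f : Int → Int) :
    ∀ (tl : List Int) (mi ms s : Int),
    (tl.foldl (fun (st : Int × Int × Int) i =>
        if st.2.2 + f i > st.2.1 then (i, st.2.2 + f i, st.2.2 + f i)
        else (st.1, st.2.1, st.2.2 + f i)) (mi, ms, s))
      = (((tl.zip (pvPS f s tl)).foldl
            (fun (m : Int × Int) x => if m.2 < x.2 then x else m) (mi, ms)).1,
         ((tl.zip (pvPS f s tl)).foldl
            (fun (m : Int × Int) x => if m.2 < x.2 then x else m) (mi, ms)).2,
         s + (tl.map f).sum) := by
  intro tl; induction tl with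
  | nil => intro mi ms s; simp
  | cons i is ih =>
      intro mi ms s
      simp only [pvPS, List.zip_cons_cons, List.foldl_cons, List.map_cons, List.sum_cons]
      by_cases h : s + f i > ms
      · simp only [if_pos h]
        rw [ih]; ring_nf
      · simp only [if_neg h]
        rw [ih]; ring_nf

-- ===== VERDICT (by name: the statement is the Claim_ definition above) =====
theorem find_max_subarray_from_one_end_spec : Claim_equal_find_max_subarray_from_one_end := by
  intro array rs _ hpre
  obtain ⟨hne, -⟩ := hpre
  obtain ⟨h, tl, rfl⟩ := List.exists_cons_of_ne_nil hne
  unfold Spec_find_max_subarray_from_one_end find_max_subarray_from_one_end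
    find_max_subarray_from_one_end_alt
  simp only [PySem.List.pyGet?_zero_cons, Option.getD_some, PySem.List.slice_from_one,
    List.tail_cons]
  rw [pvSumsB_eq (fun i => (PySem.List.pyGet? array i).getD 0) (h :: tl)]
  have hps0 : pvPS (fun i => (PySem.List.pyGet? array i).getD 0) 0 (h :: tl)
      = ((PySem.List.pyGet? array h).getD 0)
          :: pvPS (fun i => (PySem.List.pyGet? array i).getD 0) ((PySem.List.pyGet? array h).getD 0) tl := by
    simp [pvPS]
  rw [hps0, List.zip_cons_cons, pvMax2, Option.getD_some,
    pvFold_eq (fun i => (PySem.List.pyGet? array i).getD 0) tl h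
      ((PySem.List.pyGet? array h).getD 0) ((PySem.List.pyGet? array h).getD 0)]
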